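-- pv_equiv track=rewrite | github.com/DrDavidL/sem-mem | sem_mem/thread_utils.py | _format_messages_for_title
-- ===== SOURCE A (Python) =====
-- from typing import List, Dict, Optional, TYPE_CHECKING, Union
--
-- def _format_messages_for_title(messages: List[Dict], max_chars: int = 2000) -> str:
--     """
--     Format messages into a condensed string for title generation.
--
--     Truncates to max_chars to avoid sending too much context.
--     """
--     parts = []
--     total_chars = 0
--
--     for msg in messages:
--         role = msg.get("role", "unknown").upper()
--         content = msg.get("content", "")
--
--         # Strip system logs from assistant messages
--         if role == "ASSISTANT":
--             if "**System Logs:**" in content: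
--                 content = content.split("**System Logs:**")[0].strip()
--             if "**Retrieved Context:**" in content:
--                 content = content.split("**Retrieved Context:**")[0].strip()
--
--         # Truncate individual messages if needed
--         if len(content) > 500:
--             content = content[:500] + "..."
--
--         line = f"{role}: {content}"
--         if total_chars + len(line) > max_chars:
--             break
--         parts.append(line)
--         total_chars += len(line) + 1
--
--     return "\n".join(parts)
-- ===== SOURCE B (Python) =====
-- from itertools import accumulate
-- from typing import List, Dict
--
-- _MARKERS = ("**System Logs:**", "**Retrieved Context:**")
--
--
-- def _cut(content: str, marker: str) -> str:
--     return content.split(marker)[0].strip() if marker in content else content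
--
--
-- def _line(msg: Dict) -> str:
--     role = msg.get("role", "unknown").upper()
--     content = msg.get("content", "")
--     if role == "ASSISTANT":
--         for marker in _MARKERS:
--             content = _cut(content, marker)
--     if len(content) > 500:
--         content = content[:500] + "..."
--     return role + ": " + content
--
--
-- def _format_messages_for_title(messages: List[Dict], max_chars: int = 2000) -> str:
--     # Phase 1: map every message to its finished line.
--     lines = [_line(m) for m in messages]
--     # Phase 2: inclusive prefix sums of len(line)+1 ("+1" = separator); line i is
--     # over budget exactly when ends[i] - 1 > max_chars, so the first such index is
--     # the number of lines kept.
--     ends = list(accumulate(len(l) + 1 for l in lines))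
--     k = next((i for i, e in enumerate(ends) if e - 1 > max_chars), len(lines))
--     return "\n".join(lines[:k])
-- ===== Notes on version B (the rewrite author's own statement) =====
-- stated objective: alternative
-- what changed: A's single interleaved transform-and-break loop with a running total is replaced by staged passes: messages are first mapped to finished lines (the marker stripping itself becoming a fold of a cut helper over a marker list), then an inclusive prefix-sum table of len(line)+1 is built with itertools.accumulate and the kept prefix is the first index whose prefix sum minus 1 exceeds max_chars.
import Mathlib
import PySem

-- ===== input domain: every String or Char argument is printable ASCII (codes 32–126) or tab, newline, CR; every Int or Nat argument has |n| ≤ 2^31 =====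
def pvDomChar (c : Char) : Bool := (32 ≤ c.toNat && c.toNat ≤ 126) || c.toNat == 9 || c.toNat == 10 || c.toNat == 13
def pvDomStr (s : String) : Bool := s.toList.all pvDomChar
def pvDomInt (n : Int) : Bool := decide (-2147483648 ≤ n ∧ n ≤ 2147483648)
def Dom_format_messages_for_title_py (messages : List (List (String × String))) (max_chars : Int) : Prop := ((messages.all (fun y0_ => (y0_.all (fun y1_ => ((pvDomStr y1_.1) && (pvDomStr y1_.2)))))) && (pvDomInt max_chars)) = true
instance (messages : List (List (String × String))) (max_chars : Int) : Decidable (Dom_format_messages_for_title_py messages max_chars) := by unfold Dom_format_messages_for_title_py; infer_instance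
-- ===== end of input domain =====

-- ===== PORT A =====
-- B replaces A's interleaved transform-and-break loop by staged passes: map to lines
-- (marker stripping as a fold of a cut helper), inclusive prefix sums, first over-budget
-- index, join of that prefix (objective: alternative decomposition, same cost).

-- A's loop: carries (parts, total_chars), transforms each message inline, breaks on budget.
def pvGoA (max_chars : Int) : List (List (String × String)) → List String → Int → List String
  | [], parts, _ => parts
  | msg :: rest, parts, total_chars =>
      let role := PySem.Str.upper ((PySem.Dict.mk msg).getD "role" "unknown")
      let content := (PySem.Dict.mk msg).getD "content" ""
      let content :=
        if role == "ASSISTANT" then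
          let content :=
            if PySem.Str.isIn "**System Logs:**" content then
              PySem.Str.strip (((PySem.Str.split? content "**System Logs:**").getD []).headD "")
            else content
          if PySem.Str.isIn "**Retrieved Context:**" content then
            PySem.Str.strip (((PySem.Str.split? content "**Retrieved Context:**").getD []).headD "")
          else content
        else content
      let content :=
        if (PySem.Str.len content : Int) > 500 then
          PySem.Str.slice content none (some 500) ++ "..."
        else content
      let line := role ++ ": " ++ content
      if total_chars + (PySem.Str.len line : Int) > max_chars then parts
      else pvGoA max_chars rest (parts ++ [line]) (total_chars + (PySem.Str.len line : Int) + 1)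

def format_messages_for_title_py (messages : List (List (String × String))) (max_chars : Int) : String :=
  PySem.Str.join "\n" (pvGoA max_chars messages [] 0)

-- ===== PORT B =====
-- Source B's _cut helper: drop everything from the first occurrence of marker, then strip.
def pvCut (content marker : String) : String :=
  if PySem.Str.isIn marker content then
    PySem.Str.strip (((PySem.Str.split? content marker).getD []).headD "")
  else content

-- Source B's _line helper: role prefix, fold of _cut over the marker list, truncation.
def pvLine (msg : List (String × String)) : String :=
  let role := PySem.Str.upper ((PySem.Dict.mk msg).getD "role" "unknown")
  let content := (PySem.Dict.mk msg).getD "content" ""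
  let content :=
    if role == "ASSISTANT" then
      ["**System Logs:**", "**Retrieved Context:**"].foldl pvCut content
    else content
  let content :=
    if (PySem.Str.len content : Int) > 500 then
      PySem.Str.slice content none (some 500) ++ "..."
    else content
  role ++ ": " ++ content

-- itertools.accumulate: inclusive running sums starting from t.
def pvAccum (t : Int) : List Int → List Int
  | [] => []
  | s :: rest => (t + s) :: pvAccum (t + s) rest

def format_messages_for_title_py_alt (messages : List (List (String × String))) (max_chars : Int) : String :=
  let lines := messages.map pvLine
  let ends := pvAccum 0 (lines.map (fun l => (PySem.Str.len l : Int) + 1))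
  -- next((i for i, e in enumerate(ends) if e - 1 > max_chars), len(lines)):
  -- List.findIdx returns the list's length when no element matches, = len(lines).
  let k := ends.findIdx (fun e => decide (e - 1 > max_chars))
  PySem.Str.join "\n" (lines.take k)

-- ===== PRECONDITION & SPEC =====
def Spec_format_messages_for_title_py (messages : List (List (String × String))) (max_chars : Int) (out : String) : Prop := out = format_messages_for_title_py_alt messages max_chars
instance (messages : List (List (String × String))) (max_chars : Int) (out : String) : Decidable (Spec_format_messages_for_title_py messages max_chars out) := by unfold Spec_format_messages_for_title_py; infer_instance

-- ===== CLAIM (what is proved, stated in full; the proofs are below) =====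
def Claim_equal_format_messages_for_title_py : Prop := ∀ (messages : List (List (String × String))) (max_chars : Int), Dom_format_messages_for_title_py messages max_chars → Spec_format_messages_for_title_py messages max_chars (format_messages_for_title_py messages max_chars)

-- ===== LEMMAS AND PROOFS =====

-- proof-side break index: number of lines kept starting from running total t
def pvKeep (max_chars : Int) : Int → List String → Nat
  | _, [] => 0
  | t, l :: ls =>
      if t + (PySem.Str.len l : Int) > max_chars then 0
      else 1 + pvKeep max_chars (t + (PySem.Str.len l : Int) + 1) ls

theorem pvFindIdx_accum (max_chars : Int) (ls : List String) :
    ∀ (t : Int),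
      (pvAccum t (ls.map (fun l => (PySem.Str.len l : Int) + 1))).findIdx
          (fun e => decide (e - 1 > max_chars))
        = pvKeep max_chars t ls := by
  induction ls with
  | nil => intro t; simp [pvAccum, pvKeep]
  | cons l ls ih =>
      intro t
      rw [List.map_cons, pvAccum, List.findIdx_cons]
      have hkeep : pvKeep max_chars t (l :: ls) =
          if t + (PySem.Str.len l : Int) > max_chars then 0
          else 1 + pvKeep max_chars (t + (PySem.Str.len l : Int) + 1) ls := rfl
      rw [hkeep]
      by_cases h : t + (PySem.Str.len l : Int) > max_chars
      · have hc : decide ((t + ((PySem.Str.len l : Int) + 1)) - 1 > max_chars) = true :=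
          decide_eq_true (by omega)
        rw [if_pos h]; simp only [hc, cond_true]
      · have hc : decide ((t + ((PySem.Str.len l : Int) + 1)) - 1 > max_chars) = false :=
          decide_eq_false (by omega)
        rw [if_neg h]; simp only [hc, cond_false]
        rw [ih (t + ((PySem.Str.len l : Int) + 1)),
          show t + ((PySem.Str.len l : Int) + 1) = t + (PySem.Str.len l : Int) + 1 from by ring]
        omega

theorem pvGoA_eq (max_chars : Int) (msgs : List (List (String × String))) :
    ∀ (parts : List String) (t : Int),
      pvGoA max_chars msgs parts t
        = parts ++ (msgs.map pvLine).take (pvKeep max_chars t (msgs.map pvLine)) := by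
  induction msgs with
  | nil => intro parts t; simp [pvGoA, pvKeep]
  | cons msg rest ih =>
      intro parts t
      have hstep : pvGoA max_chars (msg :: rest) parts t =
          if t + (PySem.Str.len (pvLine msg) : Int) > max_chars then parts
          else pvGoA max_chars rest (parts ++ [pvLine msg])
            (t + (PySem.Str.len (pvLine msg) : Int) + 1) := by
        simp only [pvGoA, pvLine, List.foldl, pvCut]
      have hkeep : pvKeep max_chars t ((msg :: rest).map pvLine) =
          if t + (PySem.Str.len (pvLine msg) : Int) > max_chars then 0
          else 1 + pvKeep max_chars (t + (PySem.Str.len (pvLine msg) : Int) + 1)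
            (rest.map pvLine) := rfl
      rw [hstep, hkeep]
      by_cases h : t + (PySem.Str.len (pvLine msg) : Int) > max_chars
      · rw [if_pos h, if_pos h, List.take_zero, List.append_nil]
      · rw [if_neg h, if_neg h, ih, List.map_cons,
          show 1 + pvKeep max_chars (t + (PySem.Str.len (pvLine msg) : Int) + 1)
              (rest.map pvLine)
            = pvKeep max_chars (t + (PySem.Str.len (pvLine msg) : Int) + 1)
              (rest.map pvLine) + 1 from Nat.add_comm 1 _,
          List.take_succ_cons]
        simp [List.append_assoc]

-- ===== VERDICT (by name: the statement is the Claim_ definition above) =====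
theorem format_messages_for_title_py_spec : Claim_equal_format_messages_for_title_py := by
  intro messages max_chars _
  unfold Spec_format_messages_for_title_py format_messages_for_title_py format_messages_for_title_py_alt
  rw [pvGoA_eq]
  show _ = PySem.Str.join "\n" ((messages.map pvLine).take
    ((pvAccum 0 ((messages.map pvLine).map (fun l => (PySem.Str.len l : Int) + 1))).findIdx
      (fun e => decide (e - 1 > max_chars))))
  rw [pvFindIdx_accum]
  simp
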